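-- pv_equiv track=rewrite | github.com/prernaa/TwitterOPINE | pyfiles/rulesPredict.py | findButsFrmTokens
-- ===== SOURCE A (Python) =====
-- def removeRepeats(raw):
--     Lcase = raw.lower()
--     if len(Lcase)==0:
--         return raw
--     new = Lcase[0]
--     numrepeat = 0
--     for ei in range(0, len(Lcase)-1):
--         prev = Lcase[ei]
--         curr = Lcase[ei+1]
--         if prev!=curr:
--             new=new+curr
--         else:
--             numrepeat=numrepeat+1
--     return new
--
-- def findButsFrmTokens(tokens):
--     butlocs= []
--     for ti in range(0, len(tokens)):
--         t = tokens[ti]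
--         normt = removeRepeats(t)
--         if normt=="but" or normt=="but_neg":
--             butlocs.append(ti)
--     return butlocs
-- ===== SOURCE B (Python) =====
-- def _eat(s, c):
--     # consume one nonempty run of character c from the front of s; None if absent
--     if not s or s[0] != c:
--         return None
--     while s and s[0] == c:
--         s = s[1:]
--     return s
--
-- def _is_but(s):
--     # does s consist of runs b+ u+ t+ optionally followed by _+ n+ e+ g+ ?
--     rest = s
--     for c in 'but':
--         rest = _eat(rest, c)
--         if rest is None:
--             return False
--     if rest == '':
--         return True
--     for c in '_neg':
--         rest = _eat(rest, c)
--         if rest is None: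
--             return False
--     return rest == ''
--
-- def findButsFrmTokens(tokens):
--     return [i for i, t in enumerate(tokens) if _is_but(t.lower())]
-- ===== Notes on version B (the rewrite author's own statement) =====
-- stated objective: alternative
-- what changed: Instead of collapsing repeated characters of each lowercased token into a new string (per-character appends) and comparing it with 'but'/'but_neg', B matches each token directly with a run-consuming pattern matcher (b+u+t+ optionally followed by _+n+e+g+) that early-exits at the first character that cannot fit the pattern.
import Mathlib
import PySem

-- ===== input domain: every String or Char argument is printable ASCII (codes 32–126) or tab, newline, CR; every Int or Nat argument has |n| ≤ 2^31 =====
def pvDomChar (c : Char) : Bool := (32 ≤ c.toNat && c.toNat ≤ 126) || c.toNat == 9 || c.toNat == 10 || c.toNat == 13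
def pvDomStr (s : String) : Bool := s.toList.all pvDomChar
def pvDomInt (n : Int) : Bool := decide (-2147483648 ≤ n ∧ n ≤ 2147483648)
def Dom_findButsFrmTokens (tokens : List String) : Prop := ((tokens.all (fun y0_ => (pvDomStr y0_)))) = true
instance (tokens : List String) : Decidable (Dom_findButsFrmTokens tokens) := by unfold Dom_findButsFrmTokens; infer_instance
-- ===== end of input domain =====

-- B replaces A's collapse-repeated-characters pass + string comparison by a direct run-consuming
-- pattern matcher (b+u+t+ optionally followed by _+n+e+g+) on each lowercased token.

-- ===== PORT A =====
-- removeRepeats(raw): lowercase, keep first char, append each char that differs from its predecessor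
def removeRepeats (raw : String) : String :=
  let Lcase := (PySem.Str.lower raw).toList
  if Lcase.length = 0 then raw
  else
    let res := (PySem.List.pyRange 0 ((Lcase.length : Int) - 1) 1).foldl
      (fun st ei =>
        if PySem.List.pyGetD Lcase ei ' ' ≠ PySem.List.pyGetD Lcase (ei + 1) ' '
        then (st.1 ++ [PySem.List.pyGetD Lcase (ei + 1) ' '], st.2)
        else (st.1, st.2 + 1))
      ([PySem.List.pyGetD Lcase 0 ' '], (0 : Int))
    String.ofList res.1

def findButsFrmTokens (tokens : List String) : List Int :=
  (PySem.List.pyRange 0 (tokens.length : Int) 1).foldl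
    (fun butlocs ti =>
      if removeRepeats (PySem.List.pyGetD tokens ti "") = "but"
         ∨ removeRepeats (PySem.List.pyGetD tokens ti "") = "but_neg"
      then butlocs ++ [ti] else butlocs) []

-- ===== PORT B =====
-- _eat(s, c): consume one nonempty run of c from the front (index scan + one tail slice = dropWhile)
def pvEat (c : Char) (s : List Char) : Option (List Char) :=
  match s with
  | [] => none
  | x :: _ => if x = c then some (s.dropWhile (· = c)) else none

-- the for-loops over 'but' / '_neg' with early exit on None (none propagates through the fold)
def pvEatSeq (cs : List Char) (s : List Char) : Option (List Char) :=
  cs.foldl (fun acc c => match acc with | none => none | some r => pvEat c r) (some s)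

def pvIsBut (s : List Char) : Bool :=
  match pvEatSeq ['b', 'u', 't'] s with
  | none => false
  | some rest =>
    if rest = [] then true
    else
      match pvEatSeq ['_', 'n', 'e', 'g'] rest with
      | none => false
      | some r => decide (r = [])

def findButsFrmTokens_alt (tokens : List String) : List Int :=
  (PySem.List.enumerate tokens 0).filterMap
    (fun p => if pvIsBut (PySem.Str.lower p.2).toList then some p.1 else none)

-- ===== PRECONDITION & SPEC =====
def Spec_findButsFrmTokens (tokens : List String) (out : List Int) : Prop := out = findButsFrmTokens_alt tokens
instance (tokens : List String) (out : List Int) : Decidable (Spec_findButsFrmTokens tokens out) := by unfold Spec_findButsFrmTokens; infer_instance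

-- ===== CLAIM (what is proved, stated in full; the proofs are below) =====
def Claim_equal_findButsFrmTokens : Prop := ∀ (tokens : List String), Dom_findButsFrmTokens tokens → Spec_findButsFrmTokens tokens (findButsFrmTokens tokens)

-- ===== LEMMAS AND PROOFS =====

-- the collapsed-runs string A's removeRepeats loop computes, as a structural recursion
def pvCollapseAux (p : Char) : List Char → List Char
  | [] => []
  | c :: cs => if p ≠ c then c :: pvCollapseAux c cs else pvCollapseAux p cs

def pvCollapse : List Char → List Char
  | [] => []
  | x :: xs => x :: pvCollapseAux x xs

theorem pvCollapseAux_dropWhile : ∀ (xs : List Char) (p : Char),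
    pvCollapseAux p xs = pvCollapse (xs.dropWhile (· = p)) := by
  intro xs
  induction xs with
  | nil => intro p; rfl
  | cons c cs ih =>
    intro p
    by_cases h : p = c
    · subst h
      rw [show pvCollapseAux p (p :: cs) = pvCollapseAux p cs by simp [pvCollapseAux],
        List.dropWhile_cons_of_pos (by simp)]
      exact ih p
    · rw [List.dropWhile_cons_of_neg (by simpa using fun hh => h hh.symm)]
      simp [pvCollapseAux, h, pvCollapse]

theorem pvCollapse_eq_nil {s : List Char} : pvCollapse s = [] ↔ s = [] := by
  cases s with
  | nil => simp [pvCollapse]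
  | cons x xs => simp [pvCollapse]

theorem pvEat_some_collapse {c : Char} {s r : List Char} (h : pvEat c s = some r) :
    pvCollapse s = c :: pvCollapse r := by
  cases s with
  | nil => simp [pvEat] at h
  | cons x xs =>
    by_cases hx : x = c
    · subst hx
      rw [pvEat, if_pos rfl, Option.some.injEq] at h
      rw [List.dropWhile_cons_of_pos (by simp)] at h
      subst h
      rw [show pvCollapse (x :: xs) = x :: pvCollapseAux x xs from rfl,
        pvCollapseAux_dropWhile]
    · rw [pvEat, if_neg hx] at h
      cases h

theorem pvEat_of_collapse {c : Char} {s rest : List Char} (h : pvCollapse s = c :: rest) :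
    ∃ r, pvEat c s = some r ∧ pvCollapse r = rest := by
  cases s with
  | nil => simp [pvCollapse] at h
  | cons x xs =>
    rw [show pvCollapse (x :: xs) = x :: pvCollapseAux x xs from rfl, List.cons.injEq] at h
    obtain ⟨hx, hrest⟩ := h
    subst hx
    refine ⟨xs.dropWhile (· = x), ?_, ?_⟩
    · rw [pvEat, if_pos rfl, List.dropWhile_cons_of_pos (by simp)]
    · rw [← pvCollapseAux_dropWhile]; exact hrest

theorem pvEatSeq_none (cs : List Char) :
    cs.foldl (fun acc c => match acc with | none => none | some r => pvEat c r) none = none := by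
  induction cs with
  | nil => rfl
  | cons c cs ih => simpa using ih

theorem pvEatSeq_some (cs : List Char) : ∀ (s r : List Char), pvEatSeq cs s = some r →
    pvCollapse s = cs ++ pvCollapse r := by
  induction cs with
  | nil =>
    intro s r h
    simp [pvEatSeq] at h
    subst h; rfl
  | cons c cs' ih =>
    intro s r h
    simp only [pvEatSeq, List.foldl_cons] at h
    cases hc : pvEat c s with
    | none => rw [hc] at h; rw [pvEatSeq_none] at h; cases h
    | some r1 =>
      rw [hc] at h
      have := ih r1 r h
      rw [pvEat_some_collapse hc, this]
      rfl

theorem pvEatSeq_ex (cs : List Char) : ∀ (s rest : List Char),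
    pvCollapse s = cs ++ rest → ∃ r, pvEatSeq cs s = some r ∧ pvCollapse r = rest := by
  induction cs with
  | nil =>
    intro s rest h
    exact ⟨s, rfl, by simpa using h⟩
  | cons c cs' ih =>
    intro s rest h
    obtain ⟨r1, hr1, hcol⟩ := pvEat_of_collapse (by simpa using h)
    obtain ⟨r, hr, hcr⟩ := ih r1 rest hcol
    refine ⟨r, ?_, hcr⟩
    simp only [pvEatSeq, List.foldl_cons, hr1]
    exact hr

theorem pvIsBut_iff (s : List Char) :
    pvIsBut s = true ↔ (pvCollapse s = ['b','u','t'] ∨ pvCollapse s = ['b','u','t','_','n','e','g']) := by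
  constructor
  · intro h
    unfold pvIsBut at h
    split at h
    · cases h
    · rename_i r h3
      have h1 := pvEatSeq_some _ _ _ h3
      split_ifs at h with hre
      · subst hre; left; simpa [pvCollapse] using h1
      · split at h
        · cases h
        · rename_i r2 h4
          have h2 := pvEatSeq_some _ _ _ h4
          simp only [decide_eq_true_eq] at h
          subst h
          right
          rw [h1, h2]
          rfl
  · intro h
    cases h with
    | inl h =>
      obtain ⟨r, hr, hcr⟩ := pvEatSeq_ex ['b','u','t'] s [] (by simpa using h)
      have hrn : r = [] := pvCollapse_eq_nil.mp hcr
      subst hrn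
      unfold pvIsBut
      rw [hr]
      simp
    | inr h =>
      obtain ⟨r, hr, hcr⟩ := pvEatSeq_ex ['b','u','t'] s ['_','n','e','g'] (by simpa using h)
      obtain ⟨r2, hr2, hcr2⟩ := pvEatSeq_ex ['_','n','e','g'] r [] (by simpa using hcr)
      have hr2nil : r2 = [] := pvCollapse_eq_nil.mp hcr2
      subst hr2nil
      have hrne : r ≠ [] := by
        intro hn; subst hn; simp [pvCollapse] at hcr
      unfold pvIsBut
      rw [hr]
      simp [hrne, hr2]

-- the pairwise index loop of removeRepeats, as a fold over adjacent pairs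
theorem pvZipFold (xs : List Char) : ∀ (x : Char) (acc : List Char) (nr : Int),
    (((x :: xs).zip xs).foldl
        (fun st p => if p.1 ≠ p.2 then (st.1 ++ [p.2], st.2) else (st.1, st.2 + 1))
        (acc, nr)).1 = acc ++ pvCollapseAux x xs := by
  induction xs with
  | nil => intro x acc nr; simp [pvCollapseAux]
  | cons y ys ih =>
    intro x acc nr
    show ((((y :: ys).zip ys).foldl _ (if x ≠ y then (acc ++ [y], nr) else (acc, nr + 1)))).1 = _
    by_cases hxy : x = y
    · subst hxy
      rw [if_neg (by simp)]
      rw [ih x acc (nr + 1)]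
      simp [pvCollapseAux]
    · rw [if_pos hxy]
      rw [ih y (acc ++ [y]) nr]
      simp [pvCollapseAux, hxy]

theorem pvZip_eq_map_range (l : List Char) :
    l.zip l.tail = (List.range (l.length - 1)).map (fun k => (l.getD k ' ', l.getD (k + 1) ' ')) := by
  apply List.ext_getElem
  · simp [List.length_zip]
  · intro i h1 h2
    have hlen : i < l.length - 1 := by simpa using h2
    have h1' : i < l.length := by omega
    have h1'' : i + 1 < l.length := by omega
    simp [List.getElem_zip, List.getElem_tail, List.getD_eq_getElem?_getD,
      List.getElem?_eq_getElem h1', List.getElem?_eq_getElem h1'']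

theorem pvRangeFold_eq_zipFold (l : List Char) (init : List Char × Int) :
    (PySem.List.pyRange 0 ((l.length : Int) - 1) 1).foldl
      (fun st ei =>
        if PySem.List.pyGetD l ei ' ' ≠ PySem.List.pyGetD l (ei + 1) ' '
        then (st.1 ++ [PySem.List.pyGetD l (ei + 1) ' '], st.2)
        else (st.1, st.2 + 1)) init
    = (l.zip l.tail).foldl
        (fun st p => if p.1 ≠ p.2 then (st.1 ++ [p.2], st.2) else (st.1, st.2 + 1)) init := by
  rw [PySem.List.pyRange_one, List.foldl_map, pvZip_eq_map_range, List.foldl_map]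
  have hcast : (((l.length : Int) - 1) - 0).toNat = l.length - 1 := by omega
  rw [hcast]
  congr 1
  funext st k
  have h1 : ((0 : Int) + (k : Nat)) = ((k : Nat) : Int) := by ring
  have h2 : (((k : Nat) : Int) + 1) = (((k + 1 : Nat)) : Int) := by push_cast; ring
  simp only [h1, h2, PySem.List.pyGetD_natCast]

theorem removeRepeats_collapse (t : String) (h : (PySem.Str.lower t).toList ≠ []) :
    removeRepeats t = String.ofList (pvCollapse (PySem.Str.lower t).toList) := by
  obtain ⟨x, xs, hl⟩ : ∃ x xs, (PySem.Str.lower t).toList = x :: xs := by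
    cases hc : (PySem.Str.lower t).toList with
    | nil => exact absurd hc h
    | cons a as => exact ⟨_, _, rfl⟩
  simp only [removeRepeats, hl]
  rw [if_neg (by simp)]
  rw [pvRangeFold_eq_zipFold (x :: xs), PySem.List.pyGetD_zero_cons]
  rw [show (x :: xs).tail = xs from rfl]
  rw [pvZipFold xs x [x] 0]
  rfl

theorem pvCond_iff (t : String) :
    (removeRepeats t = "but" ∨ removeRepeats t = "but_neg") ↔ pvIsBut (PySem.Str.lower t).toList = true := by
  by_cases h : (PySem.Str.lower t).toList = []
  · have ht : t = "" := by
      rw [PySem.Str.toList_lower] at h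
      simp [PySem.Chars.lower] at h
      exact String.ext (by simp [h])
    subst ht
    decide
  · rw [removeRepeats_collapse t h, pvIsBut_iff]
    have hinj : ∀ (a b : List Char), String.ofList a = String.ofList b ↔ a = b :=
      fun a b => ⟨fun hh => by simpa using congrArg String.toList hh, fun hh => by rw [hh]⟩
    rw [show ("but" : String) = String.ofList ['b','u','t'] from rfl,
      show ("but_neg" : String) = String.ofList ['b','u','t','_','n','e','g'] from rfl,
      hinj, hinj]

theorem pvFoldFilter (tokens : List String) : ∀ (is : List Int) (acc : List Int),
    is.foldl (fun bl ti =>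
        if removeRepeats (PySem.List.pyGetD tokens ti "") = "but"
           ∨ removeRepeats (PySem.List.pyGetD tokens ti "") = "but_neg"
        then bl ++ [ti] else bl) acc
      = acc ++ is.filterMap (fun ti =>
          if pvIsBut (PySem.Str.lower (PySem.List.pyGetD tokens ti "")).toList then some ti else none) := by
  intro is
  induction is with
  | nil => intro acc; simp
  | cons i is ih =>
    intro acc
    simp only [List.foldl_cons, List.filterMap_cons]
    by_cases hc : pvIsBut (PySem.Str.lower (PySem.List.pyGetD tokens i "")).toList = true
    · rw [if_pos ((pvCond_iff _).mpr hc), if_pos hc, ih]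
      simp
    · rw [if_neg (fun hh => hc ((pvCond_iff _).mp hh)), if_neg hc, ih]

-- ===== VERDICT (by name: the statement is the Claim_ definition above) =====
theorem findButsFrmTokens_spec : Claim_equal_findButsFrmTokens := by
  intro tokens _
  unfold Spec_findButsFrmTokens
  show findButsFrmTokens tokens = findButsFrmTokens_alt tokens
  unfold findButsFrmTokens findButsFrmTokens_alt
  rw [pvFoldFilter tokens (PySem.List.pyRange 0 (tokens.length : Int) 1) []]
  rw [PySem.List.enumerate_eq_map_pyRange tokens "", List.filterMap_map]
  simp [Function.comp, PySem.List.len_eq]
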